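-- pv_equiv track=rewrite | github.com/SwagGothamCoder/Jarvis | response_architect.py | get_word_to_compare
-- ===== SOURCE A (Python) =====
-- def get_word_to_compare(user_structure, user_input, tag_counts, part_of_speech):
--     '''Returns the nth word of a specific part of speech in the user's input, where n is the number of times the computer has iterated over a word of the same part of speech in the output structure.'''
--     word_to_compare = ''
--     count = 0
--     for i, tag in enumerate(user_structure):
--         if tag == part_of_speech:
--             count += 1
--             if count == tag_counts[part_of_speech]:
--                 word_to_compare = str(user_input[i])
--     return word_to_compare
-- ===== SOURCE B (Python) =====
-- def get_word_to_compare(user_structure, user_input, tag_counts, part_of_speech):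
--     """Index-table decomposition: collect the positions of all matching tags,
--     then pick the single n-th one (n = tag_counts[part_of_speech]) directly."""
--     indices = [i for i, tag in enumerate(user_structure) if tag == part_of_speech]
--     if not indices:
--         return ''
--     n = tag_counts[part_of_speech]
--     if 1 <= n <= len(indices):
--         return str(user_input[indices[n - 1]])
--     return ''
-- ===== Notes on version B (the rewrite author's own statement) =====
-- stated objective: simpler
-- what changed: Replaces A's running-counter loop that captures the word mid-iteration by an index-table-then-select decomposition: collect all matching positions once, then read tag_counts[part_of_speech] a single time and pick the n-th position directly.
import Mathlib
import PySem

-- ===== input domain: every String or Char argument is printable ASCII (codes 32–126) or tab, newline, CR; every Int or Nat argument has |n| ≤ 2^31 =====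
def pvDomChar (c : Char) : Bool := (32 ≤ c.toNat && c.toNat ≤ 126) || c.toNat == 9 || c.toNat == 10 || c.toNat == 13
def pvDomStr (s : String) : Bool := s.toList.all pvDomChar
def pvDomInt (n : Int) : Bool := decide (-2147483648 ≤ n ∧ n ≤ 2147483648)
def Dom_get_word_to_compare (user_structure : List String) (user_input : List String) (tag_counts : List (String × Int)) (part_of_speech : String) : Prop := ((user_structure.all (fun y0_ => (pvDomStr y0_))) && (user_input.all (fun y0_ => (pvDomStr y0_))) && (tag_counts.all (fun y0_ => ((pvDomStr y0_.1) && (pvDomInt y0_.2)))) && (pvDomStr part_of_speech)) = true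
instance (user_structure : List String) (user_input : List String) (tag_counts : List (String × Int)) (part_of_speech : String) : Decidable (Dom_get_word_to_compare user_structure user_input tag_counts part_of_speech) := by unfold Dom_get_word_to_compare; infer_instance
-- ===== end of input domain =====

-- B replaces A's running-counter-with-capture loop by an index-table-then-select
-- decomposition (collect matching positions, pick the n-th directly); objective: simpler.

-- ===== PORT A =====
-- the loop of A: state (word_to_compare, count); looks up tag_counts[part_of_speech]
-- at each matching tag exactly as A does (a missing key = KeyError, an out-of-range
-- user_input[i] = IndexError: both excluded by Pre_, the port defaults there)
def pvGoA (user_input : List String) (tag_counts : List (String × Int)) (part_of_speech : String) : List (Int × String) → String × Int → String × Int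
  | [], st => st
  | p :: rest, st =>
      pvGoA user_input tag_counts part_of_speech rest
        (if p.2 == part_of_speech then
          ((if tag_counts.lookup part_of_speech == some (st.2 + 1)
            then (PySem.List.pyGet? user_input p.1).getD ""
            else st.1), st.2 + 1)
        else st)

def get_word_to_compare (user_structure : List String) (user_input : List String) (tag_counts : List (String × Int)) (part_of_speech : String) : String :=
  (pvGoA user_input tag_counts part_of_speech (PySem.List.enumerate user_structure) ("", 0)).1

-- ===== PORT B =====
def get_word_to_compare_alt (user_structure : List String) (user_input : List String) (tag_counts : List (String × Int)) (part_of_speech : String) : String :=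
  let indices := ((PySem.List.enumerate user_structure).filter (fun p => p.2 == part_of_speech)).map Prod.fst
  if indices = [] then ""
  else
    match tag_counts.lookup part_of_speech with
    | none => ""   -- Python B raises KeyError here; excluded by Pre_
    | some n =>
        if 1 ≤ n ∧ n ≤ (indices.length : Int) then
          (PySem.List.pyGet? user_input (indices.getD (n - 1).toNat 0)).getD ""  -- IndexError excluded by Pre_
        else ""

-- ===== PRECONDITION & SPEC =====
-- Pre_ excludes exactly the inputs where Python A raises: a KeyError (some tag matches
-- but part_of_speech is not a key of tag_counts) or an IndexError (the selected n-th
-- matching position is not a valid index of user_input).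
def Pre_get_word_to_compare (user_structure : List String) (user_input : List String) (tag_counts : List (String × Int)) (part_of_speech : String) : Prop :=
  let indices := ((PySem.List.enumerate user_structure).filter (fun p => p.2 == part_of_speech)).map Prod.fst
  let n? := tag_counts.lookup part_of_speech
  (indices ≠ [] → n?.isSome = true) ∧
  ((1 ≤ n?.getD 0 ∧ n?.getD 0 ≤ (indices.length : Int)) →
    (PySem.List.pyGet? user_input (indices.getD (n?.getD 0 - 1).toNat 0)).isSome = true)
instance (user_structure : List String) (user_input : List String) (tag_counts : List (String × Int)) (part_of_speech : String) : Decidable (Pre_get_word_to_compare user_structure user_input tag_counts part_of_speech) := by unfold Pre_get_word_to_compare; infer_instance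

def pvWitness_get_word_to_compare : List String × List String × (List (String × Int)) × String :=
  (["N", "V", "N"], ["cat", "runs", "dog"], [("N", 2), ("V", 1)], "N")

def Spec_get_word_to_compare (user_structure : List String) (user_input : List String) (tag_counts : List (String × Int)) (part_of_speech : String) (out : String) : Prop := out = get_word_to_compare_alt user_structure user_input tag_counts part_of_speech
instance (user_structure : List String) (user_input : List String) (tag_counts : List (String × Int)) (part_of_speech : String) (out : String) : Decidable (Spec_get_word_to_compare user_structure user_input tag_counts part_of_speech out) := by unfold Spec_get_word_to_compare; infer_instance

-- ===== CLAIM (what is proved, stated in full; the proofs are below) =====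
def Claim_equal_get_word_to_compare : Prop := ∀ (user_structure : List String) (user_input : List String) (tag_counts : List (String × Int)) (part_of_speech : String), Dom_get_word_to_compare user_structure user_input tag_counts part_of_speech → Pre_get_word_to_compare user_structure user_input tag_counts part_of_speech → Spec_get_word_to_compare user_structure user_input tag_counts part_of_speech (get_word_to_compare user_structure user_input tag_counts part_of_speech)

-- ===== LEMMAS AND PROOFS =====

theorem pvGoA_lookup_none (ui : List String) (tc : List (String × Int)) (pos : String)
    (h : tc.lookup pos = none) :
    ∀ (L : List (Int × String)) (st : String × Int),
      (pvGoA ui tc pos L st).1 = st.1 := by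
  intro L
  induction L with
  | nil => intro st; rfl
  | cons p rest ih =>
      intro st
      simp only [pvGoA, h]
      by_cases hp : p.2 == pos
      · simp [hp, ih]
      · simp [hp, ih]

theorem pvGoA_lookup_some (ui : List String) (tc : List (String × Int)) (pos : String)
    (n : Int) (h : tc.lookup pos = some n) :
    ∀ (L : List (Int × String)) (st : String × Int),
      (pvGoA ui tc pos L st).1 =
        (if 1 ≤ n - st.2 ∧ n - st.2 ≤ (((L.filter (fun p => p.2 == pos)).map Prod.fst).length : Int)
         then (PySem.List.pyGet? ui (((L.filter (fun p => p.2 == pos)).map Prod.fst).getD (n - st.2 - 1).toNat 0)).getD ""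
         else st.1) := by
  intro L
  induction L with
  | nil =>
      intro st
      simp only [List.filter_nil, List.map_nil, List.length_nil]
      have : ¬ (1 ≤ n - st.2 ∧ n - st.2 ≤ ((0 : Nat) : Int)) := by
        rintro ⟨h1, h2⟩; omega
      simp only [pvGoA]
      rw [if_neg this]
  | cons p rest ih =>
      intro st
      by_cases hp : p.2 == pos
      · simp only [pvGoA, hp, if_true, List.filter_cons, List.map_cons, List.length_cons]
        rw [ih]
        dsimp only
        rcases lt_trichotomy (n - st.2) 1 with hlt | heq | hgt
        · -- n - st.2 <= 0 : never fires, neither now nor later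
          have hne : ¬ (tc.lookup pos == some (st.2 + 1)) = true := by
            simp [h]; omega
          have c1 : ¬ (1 ≤ n - (st.2 + 1) ∧ n - (st.2 + 1) ≤ (((rest.filter (fun p => p.2 == pos)).map Prod.fst).length : Int)) := by
            rintro ⟨h1, _⟩; omega
          have c2 : ¬ (1 ≤ n - st.2 ∧ n - st.2 ≤ ((((rest.filter (fun p => p.2 == pos)).map Prod.fst).length : Nat) + 1 : Int)) := by
            rintro ⟨h1, _⟩; omega
          rw [if_neg c1, if_neg hne, if_neg (by push_cast at c2 ⊢; exact c2)]
        · -- n - st.2 = 1 : fires here, the word is captured, never overwritten later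
          have hy : (tc.lookup pos == some (st.2 + 1)) = true := by
            simp [h]; omega
          have c1 : ¬ (1 ≤ n - (st.2 + 1) ∧ n - (st.2 + 1) ≤ (((rest.filter (fun p => p.2 == pos)).map Prod.fst).length : Int)) := by
            rintro ⟨h1, _⟩; omega
          have c2 : (1 ≤ n - st.2 ∧ n - st.2 ≤ ((((rest.filter (fun p => p.2 == pos)).map Prod.fst).length : Nat) + 1 : Int)) := by
            constructor <;> omega
          have hidx : (n - st.2 - 1).toNat = 0 := by omega
          rw [if_neg c1, if_pos hy, if_pos (by push_cast at c2 ⊢; exact c2), hidx,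
            List.getD_cons_zero]
        · -- n - st.2 >= 2 : does not fire here; the target sits in the tail
          have hne : ¬ (tc.lookup pos == some (st.2 + 1)) = true := by
            simp [h]; omega
          have hidx : (n - st.2 - 1).toNat = (n - (st.2 + 1) - 1).toNat + 1 := by omega
          have hcond : (1 ≤ n - (st.2 + 1) ∧ n - (st.2 + 1) ≤ (((rest.filter (fun p => p.2 == pos)).map Prod.fst).length : Int)) ↔
              (1 ≤ n - st.2 ∧ n - st.2 ≤ ((((rest.filter (fun p => p.2 == pos)).map Prod.fst).length : Nat) + 1 : Int)) := by
            constructor <;> (rintro ⟨h1, h2⟩; push_cast at *; constructor <;> omega)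
          rw [hidx]
          by_cases hc : 1 ≤ n - (st.2 + 1) ∧ n - (st.2 + 1) ≤ (((rest.filter (fun p => p.2 == pos)).map Prod.fst).length : Int)
          · rw [if_pos hc, if_pos (by have := hcond.mp hc; push_cast at this ⊢; exact this),
              List.getD_cons_succ]
          · have hc2 : ¬ (1 ≤ n - st.2 ∧ n - st.2 ≤ ((((rest.filter (fun p => p.2 == pos)).map Prod.fst).length : Nat) + 1 : Int)) :=
              fun hx => hc (hcond.mpr hx)
            rw [if_neg hc, if_neg hne, if_neg (by push_cast at hc2 ⊢; exact hc2)]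
      · simp only [pvGoA, List.filter_cons, hp]
        simp only [Bool.false_eq_true, if_false]
        exact ih st

theorem ports_eq (us ui : List String) (tc : List (String × Int)) (pos : String) :
    get_word_to_compare us ui tc pos = get_word_to_compare_alt us ui tc pos := by
  unfold get_word_to_compare get_word_to_compare_alt
  cases h : tc.lookup pos with
  | none =>
      rw [pvGoA_lookup_none ui tc pos h]
      by_cases hi : ((PySem.List.enumerate us).filter (fun p => p.2 == pos)).map Prod.fst = []
      · simp [hi]
      · simp [hi]
  | some n =>
      rw [pvGoA_lookup_some ui tc pos n h]
      simp only [sub_zero]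
      by_cases hi : ((PySem.List.enumerate us).filter (fun p => p.2 == pos)).map Prod.fst = []
      · have : ¬ (1 ≤ n ∧ n ≤ ((((PySem.List.enumerate us).filter (fun p => p.2 == pos)).map Prod.fst).length : Int)) := by
          rintro ⟨h1, h2⟩
          rw [hi] at h2
          simp at h2
          omega
        rw [if_neg this]
        simp [hi]
      · simp [hi]

-- ===== VERDICT (by name: the statement is the Claim_ definition above) =====
theorem get_word_to_compare_spec : Claim_equal_get_word_to_compare := by
  intro us ui tc pos _ _
  unfold Spec_get_word_to_compare
  exact ports_eq us ui tc pos
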